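-- pv_equiv track=rewrite | github.com/schop-rob/sub-anything | sub_anything/translation_models/openai.py | _extract_translation
-- ===== SOURCE A (Python) =====
-- def _extract_translation(translated_lines: list[str], index: int, fallback: str) -> str:
--     idx = index + 1
--     prefixes = (f"{idx}.", f"{idx}:", f"{idx})", f"{idx} -")
--
--     for line in translated_lines:
--         stripped = line.lstrip()
--         match_prefix = next((p for p in prefixes if stripped.startswith(p)), None)
--         if match_prefix:
--             value = stripped[len(match_prefix) :].strip()
--             return value if value else fallback
--
--     return fallback
-- ===== SOURCE B (Python) =====
-- def _extract_translation(translated_lines: list[str], index: int, fallback: str) -> str: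
--     # Single-pass char scanner per line: skip whitespace, match the digits of
--     # str(index+1), then dispatch on the separator character(s).
--     num = str(index + 1)
--     for line in translated_lines:
--         i = 0
--         while i < len(line) and line[i].isspace():
--             i += 1
--         j = 0
--         while j < len(num) and i < len(line) and line[i] == num[j]:
--             i += 1
--             j += 1
--         if j < len(num):
--             continue
--         if i < len(line):
--             c = line[i]
--             if c in ".:)":
--                 value = line[i + 1:].strip()
--                 return value if value else fallback
--             if c == " " and i + 1 < len(line) and line[i + 1] == "-":
--                 value = line[i + 2:].strip()
--                 return value if value else fallback
--     return fallback
-- ===== Notes on version B (the rewrite author's own statement) =====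
-- stated objective: faster
-- what changed: Replaces the build-four-prefix-strings-and-startswith search with a direct character-level scanner that skips leading whitespace, matches the digits of str(index+1) in place, and dispatches on the separator character, allocating no prefix strings and no lstrip copy per line.
import Mathlib
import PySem

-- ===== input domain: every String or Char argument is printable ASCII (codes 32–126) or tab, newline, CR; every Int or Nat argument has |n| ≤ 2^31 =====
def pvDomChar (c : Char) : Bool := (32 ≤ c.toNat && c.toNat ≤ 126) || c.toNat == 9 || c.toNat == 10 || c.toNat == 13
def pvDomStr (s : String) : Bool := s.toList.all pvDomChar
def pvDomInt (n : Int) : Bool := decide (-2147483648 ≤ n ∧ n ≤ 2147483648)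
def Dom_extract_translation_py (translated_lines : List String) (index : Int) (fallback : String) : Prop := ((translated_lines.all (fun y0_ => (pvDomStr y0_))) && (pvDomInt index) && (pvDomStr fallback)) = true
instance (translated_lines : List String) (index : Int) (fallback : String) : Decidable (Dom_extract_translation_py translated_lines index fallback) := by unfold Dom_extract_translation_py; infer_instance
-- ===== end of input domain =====

-- B replaces A's four built prefix strings + lstrip + startswith search by a single
-- character-level scan of each line (skip whitespace, match the digits of str(index+1),
-- dispatch on the separator); objective: faster by a constant factor (no per-line allocations).

-- ===== PORT A =====
-- prefixes = (f"{idx}.", f"{idx}:", f"{idx})", f"{idx} -")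
def pyPrefixes (num : List Char) : List (List Char) :=
  [num ++ ['.'], num ++ [':'], num ++ [')'], num ++ [' ', '-']]

-- the 'for line in translated_lines' loop of A
def pyLoopA (prefixes : List (List Char)) (fallback : String) : List String → String
  | [] => fallback
  | line :: rest =>
    let stripped := PySem.Chars.lstrip line.toList
    match prefixes.find? (fun p => PySem.Chars.startswith stripped p) with
    | some p =>
      let value := PySem.Chars.strip (PySem.Chars.slice stripped (some (p.length : Int)) none)
      if value ≠ [] then String.ofList value else fallback
    | none => pyLoopA prefixes fallback rest

def extract_translation_py (translated_lines : List String) (index : Int) (fallback : String) : String :=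
  pyLoopA (pyPrefixes (PySem.Int.toChars (index + 1))) fallback translated_lines

-- ===== PORT B =====
-- Source B's first while loop: advance i past whitespace (index advance = consuming the list head)
def bSkipWs : List Char → List Char
  | [] => []
  | c :: cs => if PySem.Chars.strIsspace [c] then bSkipWs cs else c :: cs

-- Source B's second while loop: match the characters of num; some remainder iff j reached len(num)
def bMatchNum : List Char → List Char → Option (List Char)
  | [], s => some s
  | _ :: _, [] => none
  | n :: ns, c :: cs => if c = n then bMatchNum ns cs else none

-- Source B's per-line body after the two while loops: dispatch on the separator character(s);
-- 'c in ".:)"' is ported as the explicit disjunction (exact: 3 literal chars)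
def bLine (num : List Char) (line : List Char) : Option (List Char) :=
  match bMatchNum num (bSkipWs line) with
  | none => none
  | some rest =>
    match rest with
    | [] => none
    | c :: cs =>
      if c = '.' ∨ c = ':' ∨ c = ')' then some (PySem.Chars.strip cs)
      else if c = ' ' then
        match cs with
        | '-' :: cs' => some (PySem.Chars.strip cs')
        | _ => none
      else none

def bLoop (num : List Char) (fallback : String) : List String → String
  | [] => fallback
  | l :: rest =>
    match bLine num l.toList with
    | some v => if v ≠ [] then String.ofList v else fallback
    | none => bLoop num fallback rest

def extract_translation_py_alt (translated_lines : List String) (index : Int) (fallback : String) : String :=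
  bLoop (PySem.Int.toChars (index + 1)) fallback translated_lines

-- ===== PRECONDITION & SPEC =====
def Spec_extract_translation_py (translated_lines : List String) (index : Int) (fallback : String) (out : String) : Prop := out = extract_translation_py_alt translated_lines index fallback
instance (translated_lines : List String) (index : Int) (fallback : String) (out : String) : Decidable (Spec_extract_translation_py translated_lines index fallback out) := by unfold Spec_extract_translation_py; infer_instance

-- ===== CLAIM (what is proved, stated in full; the proofs are below) =====
def Claim_equal_extract_translation_py : Prop := ∀ (translated_lines : List String) (index : Int) (fallback : String), Dom_extract_translation_py translated_lines index fallback → Spec_extract_translation_py translated_lines index fallback (extract_translation_py translated_lines index fallback)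

-- ===== LEMMAS AND PROOFS =====
theorem skipWs_eq (s : List Char) : bSkipWs s = PySem.Chars.lstrip s := by
  induction s with
  | nil => rfl
  | cons c cs ih =>
    show bSkipWs (c :: cs) = List.dropWhile PySem.Chars.isspace (c :: cs)
    simp only [bSkipWs, List.dropWhile]
    have h : PySem.Chars.strIsspace [c] = PySem.Chars.isspace c := by
      simp [PySem.Chars.strIsspace]
    rw [h] at *
    cases hc : PySem.Chars.isspace c <;> simp [ih, PySem.Chars.lstrip]

theorem matchNum_eq (num s : List Char) :
    bMatchNum num s = if num <+: s then some (s.drop num.length) else none := by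
  induction num generalizing s with
  | nil => simp [bMatchNum]
  | cons n ns ih =>
    cases s with
    | nil => simp [bMatchNum]
    | cons c cs =>
      by_cases h : c = n
      · subst h
        simp [bMatchNum, ih cs, List.cons_prefix_cons]
      · have hnp : ¬ (n :: ns <+: c :: cs) := by
          rw [List.cons_prefix_cons]
          rintro ⟨h1, -⟩
          exact h h1.symm
        simp [bMatchNum, h, hnp]

theorem startswith_decide (s p : List Char) :
    PySem.Chars.startswith s p = decide (p <+: s) := by
  by_cases h : p <+: s
  · simp [PySem.Chars.startswith_iff, h]
  · rw [decide_eq_false h, Bool.eq_false_iff]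
    intro hx
    exact h ((PySem.Chars.startswith_iff _ _).mp hx)

-- per-line agreement: A's prefix search, mapped to its extracted value, is B's scanner
theorem line_eq (num line : List Char) :
    (match (pyPrefixes num).find? (fun p => PySem.Chars.startswith (PySem.Chars.lstrip line) p) with
     | some p => some (PySem.Chars.strip
         (PySem.Chars.slice (PySem.Chars.lstrip line) (some (p.length : Int)) none))
     | none => (none : Option (List Char))) = bLine num line := by
  unfold bLine
  rw [skipWs_eq, matchNum_eq]
  set s := PySem.Chars.lstrip line with hs
  by_cases hpre : num <+: s
  · obtain ⟨r, hr⟩ := hpre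
    have hdrop : s.drop num.length = r := by rw [← hr]; simp
    rw [if_pos ⟨r, hr⟩, hdrop]
    cases r with
    | nil =>
      have hsub : s = num := by rw [← hr]; simp
      have e : ∀ t : List Char, t ≠ [] → ¬ (num ++ t <+: s) := by
        intro t ht hle
        have hlen := hle.length_le
        rw [hsub] at hlen
        simp only [List.length_append] at hlen
        exact ht (List.eq_nil_of_length_eq_zero (by omega))
      simp [pyPrefixes, List.find?, startswith_decide,
        e ['.'] (by simp), e [':'] (by simp), e [')'] (by simp), e [' ', '-'] (by simp)]
    | cons c cs =>
      have hsub : s = num ++ c :: cs := hr.symm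
      have key : ∀ t : List Char, (num ++ t <+: s) ↔ (t <+: c :: cs) := by
        intro t
        rw [hsub]
        exact ⟨fun h => (List.prefix_append_right_inj num).mp h,
          fun h => (List.prefix_append_right_inj num).mpr h⟩
      have e1 : (num ++ ['.'] <+: s) ↔ c = '.' := by
        rw [key]; simp [List.cons_prefix_cons, eq_comm]
      have e2 : (num ++ [':'] <+: s) ↔ c = ':' := by
        rw [key]; simp [List.cons_prefix_cons, eq_comm]
      have e3 : (num ++ [')'] <+: s) ↔ c = ')' := by
        rw [key]; simp [List.cons_prefix_cons, eq_comm]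
      have e4 : (num ++ [' ', '-'] <+: s) ↔ (c = ' ' ∧ ['-'] <+: cs) := by
        rw [key]; simp [List.cons_prefix_cons, eq_comm]
      have dA : PySem.List.slice s (some ((num.length : Int) + 1)) none = cs := by
        rw [show ((num.length : Int) + 1) = (((num.length + 1 : Nat) : Int)) by push_cast; ring,
          PySem.List.slice_from_natCast, hsub]
        simp [List.drop_append]
      simp only [pyPrefixes, List.find?, startswith_decide]
      by_cases h1 : c = '.'
      · subst h1
        simp [e1, dA]
      · by_cases h2 : c = ':'
        · subst h2
          simp [e1, e2, dA]
        · by_cases h3 : c = ')'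
          · subst h3
            simp [e1, e2, e3, dA]
          · by_cases h4 : c = ' '
            · subst h4
              cases cs with
              | nil =>
                simp [e1, e2, e3, e4, h1, h2, h3]
              | cons d ds =>
                have e5 : (['-'] <+: d :: ds) ↔ d = '-' := by
                  simp [List.cons_prefix_cons, eq_comm]
                by_cases h5 : d = '-'
                · subst h5
                  have dB : PySem.List.slice s (some ((num.length : Int) + 2)) none = ds := by
                    rw [show ((num.length : Int) + 2) = (((num.length + 2 : Nat) : Int)) by push_cast; ring,
                      PySem.List.slice_from_natCast, hsub]
                    simp [List.drop_append]
                  simp [e1, e2, e3, e4, e5, h1, h2, h3, dB]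
                · simp [e1, e2, e3, e4, e5, h1, h2, h3, h5]
            · simp [e1, e2, e3, e4, h1, h2, h3, h4]
  · have hnone : ∀ t : List Char, ¬ (num ++ t <+: s) := by
      intro t h
      exact hpre ((num.prefix_append t).trans h)
    simp [hpre, pyPrefixes, List.find?, startswith_decide, hnone [' ', '-'],
      hnone ['.'], hnone [':'], hnone [')']]

theorem loop_eq (num : List Char) (fallback : String) (lines : List String) :
    pyLoopA (pyPrefixes num) fallback lines = bLoop num fallback lines := by
  induction lines with
  | nil => rfl
  | cons l rest ih =>
    unfold pyLoopA bLoop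
    rw [← line_eq num l.toList]
    cases h : (pyPrefixes num).find?
        (fun p => PySem.Chars.startswith (PySem.Chars.lstrip l.toList) p) with
    | none => simpa [h] using ih
    | some p => simp [h]

-- ===== VERDICT (by name: the statement is the Claim_ definition above) =====
theorem extract_translation_py_spec : Claim_equal_extract_translation_py := by
  intro lines index fallback _
  show extract_translation_py lines index fallback = extract_translation_py_alt lines index fallback
  unfold extract_translation_py extract_translation_py_alt
  exact loop_eq _ _ _
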